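-- pv_equiv track=rewrite | github.com/strangetom/ingredient-parser | ingredient_parser/en/postprocess.py | _group_name_labels
-- ===== SOURCE A (Python) =====
-- def _group_name_labels(name_labels: list[str]) -> list[list[tuple[int, str]]]:
--     """Group name labels according to name label type.
--
--     B_NAME_TOK and all following I_NAME_TOK up to the next label that is not
--     I_NAME_TOK or PUNC are grouped.
--
--     All consecutive NAME_MOD labels are grouped.
--     All consecutive NAME_VAR labels are grouped.
--
--     A NAME_SEP label starts a new group.
--
--     Parameters
--     ----------
--     name_labels : list[str]
--         List of name labels.
--
--     Returns
--     -------
--     list[list[tuple[int, str]]]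
--         List of BIO groups.
--         Each group is a list of tuples, where each tuple is the (index, label) of
--         the original name_labels list element.
--     """
--     name_groups = []
--     current_group = []
--     prev_label = None
--     for idx, label in enumerate(name_labels):
--         # Start new group on NAME_SEP name label
--         if label == "NAME_SEP":
--             if current_group:
--                 name_groups.append(current_group)
--             current_group = []
--         # Start new group for new "B_*" name label
--         elif label.startswith("B_"):
--             if current_group:
--                 name_groups.append(current_group)
--             current_group = [(idx, label)]
--         # Start new group if encountering new NAME_MOD or NAME_VAR, or append to
--         # current group if previous label was the same as current label.
--         elif label in ["NAME_MOD", "NAME_VAR"]: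
--             if prev_label == label:
--                 current_group.append((idx, label))
--             else:
--                 if current_group:
--                     name_groups.append(current_group)
--                 current_group = [(idx, label)]
--         # Must be an I_NAME_TOK or PUNC label, so append to current group
--         else:
--             current_group.append((idx, label))
--
--         prev_label = label
--
--     # Add last group to list if not empty
--     if current_group:
--         name_groups.append(current_group)
--
--     return name_groups
-- ===== SOURCE B (Python) =====
-- def _group_name_labels(name_labels: list[str]) -> list[list[tuple[int, str]]]:
--     """Two-pass: mark group boundaries, then split into groups."""
--     # Pass 1: drop NAME_SEP tokens, tag each kept token with whether it starts a new group.
--     tagged = []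
--     prev_label = None
--     for idx, label in enumerate(name_labels):
--         if label != "NAME_SEP":
--             if label.startswith("B_"):
--                 start = True
--             elif label in ("NAME_MOD", "NAME_VAR"):
--                 start = prev_label != label
--             else:
--                 start = prev_label is None or prev_label == "NAME_SEP"
--             tagged.append((idx, label, start))
--         prev_label = label
--     # Pass 2: split at the marked boundaries.
--     groups = []
--     for idx, label, start in tagged:
--         if start or not groups:
--             groups.append([(idx, label)])
--         else:
--             groups[-1].append((idx, label))
--     return groups
-- ===== Notes on version B (the rewrite author's own statement) =====
-- stated objective: alternative
-- what changed: Replaces the single four-branch stateful flush loop by a mark-then-split decomposition: one pass drops NAME_SEP and tags each kept token with a start-of-group bit computed from (label, prev_label), a second pass splits the tagged stream at those marks.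
import Mathlib
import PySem

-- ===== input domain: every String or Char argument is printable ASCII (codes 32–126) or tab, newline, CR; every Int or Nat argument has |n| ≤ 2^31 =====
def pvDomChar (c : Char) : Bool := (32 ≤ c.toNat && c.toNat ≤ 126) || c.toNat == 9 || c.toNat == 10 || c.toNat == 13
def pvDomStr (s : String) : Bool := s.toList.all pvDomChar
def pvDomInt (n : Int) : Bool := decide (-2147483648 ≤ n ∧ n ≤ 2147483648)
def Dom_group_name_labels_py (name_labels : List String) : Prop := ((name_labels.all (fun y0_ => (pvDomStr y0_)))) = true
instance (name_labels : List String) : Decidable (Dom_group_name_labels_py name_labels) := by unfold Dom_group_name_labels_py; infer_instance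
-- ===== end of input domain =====

-- B replaces A's four-branch stateful flush loop by a mark-boundaries-then-split decomposition (alternative, same cost).

-- ===== PORT A =====
-- A's loop body: state = (name_groups, current_group, prev_label)
def pyStepA (st : List (List (Int × String)) × List (Int × String) × Option String)
    (p : Int × String) :
    List (List (Int × String)) × List (Int × String) × Option String :=
  let gs := st.1; let cur := st.2.1; let prev := st.2.2
  let idx := p.1; let label := p.2
  if label = "NAME_SEP" then
    ((if cur = [] then gs else gs ++ [cur]), [], some label)
  else if PySem.Str.startswith label "B_" then
    ((if cur = [] then gs else gs ++ [cur]), [(idx, label)], some label)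
  else if label = "NAME_MOD" ∨ label = "NAME_VAR" then
    (if prev = some label then (gs, cur ++ [(idx, label)], some label)
     else ((if cur = [] then gs else gs ++ [cur]), [(idx, label)], some label))
  else
    (gs, cur ++ [(idx, label)], some label)

def group_name_labels_py (name_labels : List String) : List (List (Int × String)) :=
  let st := (PySem.List.enumerate name_labels).foldl pyStepA ([], [], none)
  if st.2.1 = [] then st.1 else st.1 ++ [st.2.1]

-- ===== PORT B =====
-- B pass 1 loop body: state = (tagged, prev_label); drops NAME_SEP, tags kept tokens with a start bit.
def pyTagStep (st : List (Int × String × Bool) × Option String) (p : Int × String) :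
    List (Int × String × Bool) × Option String :=
  let tagged := st.1; let prev := st.2
  let idx := p.1; let label := p.2
  if label ≠ "NAME_SEP" then
    let start :=
      if PySem.Str.startswith label "B_" then true
      else if label = "NAME_MOD" ∨ label = "NAME_VAR" then decide (prev ≠ some label)
      else decide (prev = none ∨ prev = some "NAME_SEP")
    (tagged ++ [(idx, label, start)], some label)
  else
    (tagged, some label)

-- B pass 2 loop body: open a new group at a mark (or when empty), else append to the last group.
def pySplitStep (groups : List (List (Int × String))) (t : Int × String × Bool) :
    List (List (Int × String)) :=
  let idx := t.1; let label := t.2.1; let start := t.2.2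
  if start || groups.isEmpty then groups ++ [[(idx, label)]]
  else groups.dropLast ++ [groups.getLast! ++ [(idx, label)]]

def group_name_labels_py_alt (name_labels : List String) : List (List (Int × String)) :=
  let tagged := ((PySem.List.enumerate name_labels).foldl pyTagStep ([], none)).1
  tagged.foldl pySplitStep []

-- ===== PRECONDITION & SPEC =====
def Spec_group_name_labels_py (name_labels : List String) (out : List (List (Int × String))) : Prop := out = group_name_labels_py_alt name_labels
instance (name_labels : List String) (out : List (List (Int × String))) : Decidable (Spec_group_name_labels_py name_labels out) := by unfold Spec_group_name_labels_py; infer_instance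

-- ===== CLAIM (what is proved, stated in full; the proofs are below) =====
def Claim_equal_group_name_labels_py : Prop := ∀ (name_labels : List String), Dom_group_name_labels_py name_labels → Spec_group_name_labels_py name_labels (group_name_labels_py name_labels)

-- ===== LEMMAS AND PROOFS =====

-- flush: A's "append current group if nonempty"
def pvFlush (gs : List (List (Int × String))) (cur : List (Int × String)) : List (List (Int × String)) :=
  if cur = [] then gs else gs ++ [cur]

lemma pyTagStep_acc (t : List (Int × String × Bool)) (prev : Option String) (p : Int × String) :
    pyTagStep (t, prev) p = (t ++ (pyTagStep ([], prev) p).1, (pyTagStep ([], prev) p).2) := by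
  simp only [pyTagStep]
  split_ifs <;> simp

lemma tag_foldl_acc (l : List (Int × String)) (t : List (Int × String × Bool)) (prev : Option String) :
    l.foldl pyTagStep (t, prev)
      = (t ++ (l.foldl pyTagStep ([], prev)).1, (l.foldl pyTagStep ([], prev)).2) := by
  induction l generalizing t prev with
  | nil => simp
  | cons p tl ih =>
    simp only [List.foldl_cons]
    rw [pyTagStep_acc, ih, ih (pyTagStep ([], prev) p).1]
    simp

lemma main_inv (l : List (Int × String)) (gs : List (List (Int × String)))
    (cur : List (Int × String)) (prev : Option String)
    (h : cur = [] ↔ (prev = none ∨ prev = some "NAME_SEP")) :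
    pvFlush (l.foldl pyStepA (gs, cur, prev)).1 (l.foldl pyStepA (gs, cur, prev)).2.1
      = (l.foldl pyTagStep ([], prev)).1.foldl pySplitStep (pvFlush gs cur) := by
  induction l generalizing gs cur prev with
  | nil => simp [pvFlush]
  | cons p tl ih =>
    obtain ⟨idx, label⟩ := p
    simp only [List.foldl_cons]
    by_cases hsep : label = "NAME_SEP"
    · rw [show pyStepA (gs, cur, prev) (idx, label) = (pvFlush gs cur, [], some label) by
        simp [pyStepA, hsep, pvFlush]]
      rw [show pyTagStep ([], prev) (idx, label) = ([], some label) by simp [pyTagStep, hsep]]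
      rw [tag_foldl_acc]
      rw [ih _ _ _ (by simp [hsep])]
      simp [pvFlush]
    · by_cases hb : PySem.Chars.startswith label.toList ['B', '_'] = true
      · rw [show pyStepA (gs, cur, prev) (idx, label)
            = (pvFlush gs cur, [(idx, label)], some label) by
          simp [pyStepA, hsep, hb, pvFlush]]
        rw [show pyTagStep ([], prev) (idx, label) = ([(idx, label, true)], some label) by
          simp [pyTagStep, hsep, hb]]
        rw [tag_foldl_acc]
        rw [ih _ _ _ (by simp [hsep])]
        simp [pySplitStep, pvFlush]
      · by_cases hmv : label = "NAME_MOD" ∨ label = "NAME_VAR"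
        · by_cases hp : prev = some label
          · have hcur : cur ≠ [] := by
              intro hc
              rcases h.mp hc with h1 | h1 <;> rw [h1] at hp <;>
                rcases hmv with h2 | h2 <;> simp_all
            rw [show pyStepA (gs, cur, prev) (idx, label)
                = (gs, cur ++ [(idx, label)], some label) by
              simp [pyStepA, hsep, hb, hmv, hp]]
            rw [show pyTagStep ([], prev) (idx, label)
                = ([(idx, label, false)], some label) by
              simp [pyTagStep, hsep, hb, hmv, hp]]
            rw [tag_foldl_acc]
            rw [ih _ _ _ (by simp [hsep])]
            have : pySplitStep (pvFlush gs cur) (idx, label, false)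
                = pvFlush gs (cur ++ [(idx, label)]) := by
              simp only [pySplitStep, pvFlush, if_neg hcur,
                if_neg (by simp : ¬(cur ++ [(idx, label)] = []))]
              rw [List.getLast!_eq_getLast?_getD]
              simp
            simp only [List.singleton_append, List.foldl_cons, this]
          · rw [show pyStepA (gs, cur, prev) (idx, label)
                = (pvFlush gs cur, [(idx, label)], some label) by
              simp [pyStepA, hsep, hb, hmv, hp, pvFlush]]
            rw [show pyTagStep ([], prev) (idx, label)
                = ([(idx, label, true)], some label) by
              simp [pyTagStep, hsep, hb, hmv, hp]]
            rw [tag_foldl_acc]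
            rw [ih _ _ _ (by simp [hsep])]
            simp [pySplitStep, pvFlush]
        · rw [show pyStepA (gs, cur, prev) (idx, label)
              = (gs, cur ++ [(idx, label)], some label) by
            simp [pyStepA, hsep, hb, hmv]]
          rw [show pyTagStep ([], prev) (idx, label)
              = ([(idx, label, decide (prev = none ∨ prev = some "NAME_SEP"))], some label) by
            simp [pyTagStep, hsep, hb, hmv]]
          rw [tag_foldl_acc]
          rw [ih _ _ _ (by simp [hsep])]
          by_cases hcur : cur = []
          · have hstart : decide (prev = none ∨ prev = some "NAME_SEP") = true := by
              simpa using h.mp hcur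
            rw [hstart]
            subst hcur
            simp [pySplitStep, pvFlush]
          · have hstart : decide (prev = none ∨ prev = some "NAME_SEP") = false := by
              simp only [decide_eq_false_iff_not]
              intro hc; exact hcur (h.mpr hc)
            rw [hstart]
            have : pySplitStep (pvFlush gs cur) (idx, label, false)
                = pvFlush gs (cur ++ [(idx, label)]) := by
              simp only [pySplitStep, pvFlush, if_neg hcur,
                if_neg (by simp : ¬(cur ++ [(idx, label)] = []))]
              rw [List.getLast!_eq_getLast?_getD]
              simp
            simp only [List.singleton_append, List.foldl_cons, this]

-- ===== VERDICT (by name: the statement is the Claim_ definition above) =====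
theorem group_name_labels_py_spec : Claim_equal_group_name_labels_py := by
  intro name_labels _
  show group_name_labels_py name_labels = group_name_labels_py_alt name_labels
  have := main_inv (PySem.List.enumerate name_labels) [] [] none (by simp)
  simpa [group_name_labels_py, group_name_labels_py_alt, pvFlush] using this
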